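-- pv_equiv track=rewrite | github.com/tophorse25/RAG-local | step6_build_prompt.py | _keyword_hits
-- ===== SOURCE A (Python) =====
-- from typing import List, Tuple
--
-- KEYWORD_MAX = 4              # max keyword chunks to force include
--
-- def _keyword_hits(all_docs: List[str]) -> List[str]:
--     """
--     Deterministic keyword-based retrieval for cover page / header lines.
--     This guarantees we pull the cover page chunk if it's in the DB.
--     """
--     needles = [
--         "For the quarterly period ended",
--         "FORM 10-Q",
--         "QUARTERLY REPORT",
--         "Commission file number",
--         "UNITED STATES SECURITIES AND EXCHANGE COMMISSION",
--     ]
--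
--     hits: List[Tuple[int, str]] = []
--     for i, d in enumerate(all_docs):
--         dl = (d or "").lower()
--         score = 0
--         for n in needles:
--             if n.lower() in dl:
--                 score += 1
--         if score > 0:
--             hits.append((score, d))
--
--     # Sort by score desc, keep strongest cover-like chunks
--     hits.sort(key=lambda x: x[0], reverse=True)
--     return [d for _, d in hits[:KEYWORD_MAX]]
-- ===== SOURCE B (Python) =====
-- from typing import List
--
-- KEYWORD_MAX = 4              # max keyword chunks to force include
--
-- def _keyword_hits(all_docs: List[str]) -> List[str]:
--     """Counting-sort variant: bucket docs by score (1..5), concatenate high-to-low."""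
--     needles = [
--         "For the quarterly period ended",
--         "FORM 10-Q",
--         "QUARTERLY REPORT",
--         "Commission file number",
--         "UNITED STATES SECURITIES AND EXCHANGE COMMISSION",
--     ]
--     buckets = [[] for _ in range(6)]   # index = score; buckets[0] stays unused
--     for d in all_docs:
--         dl = (d or "").lower()
--         score = sum(1 for n in needles if n.lower() in dl)
--         if score > 0:
--             buckets[score].append(d)
--     ranked = buckets[5] + buckets[4] + buckets[3] + buckets[2] + buckets[1]
--     return ranked[:KEYWORD_MAX]
-- ===== Notes on version B (the rewrite author's own statement) =====
-- stated objective: alternative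
-- what changed: Replaces collect-pairs-then-stable-reverse-sort with a counting sort: docs are appended to score-indexed buckets in one pass and the buckets are concatenated from score 5 down to 1 before taking the first 4.
import Mathlib
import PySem

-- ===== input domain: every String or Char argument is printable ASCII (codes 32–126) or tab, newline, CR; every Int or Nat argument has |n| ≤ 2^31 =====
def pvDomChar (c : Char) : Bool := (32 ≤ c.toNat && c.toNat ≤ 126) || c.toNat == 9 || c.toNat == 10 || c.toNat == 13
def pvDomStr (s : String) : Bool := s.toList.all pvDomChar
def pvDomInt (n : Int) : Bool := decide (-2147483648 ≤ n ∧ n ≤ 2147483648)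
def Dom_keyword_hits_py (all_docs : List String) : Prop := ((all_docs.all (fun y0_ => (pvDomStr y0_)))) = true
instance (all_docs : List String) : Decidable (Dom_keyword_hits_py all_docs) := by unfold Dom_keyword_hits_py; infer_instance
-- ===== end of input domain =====

-- B replaces A's collect-then-stable-reverse-sort with score-indexed buckets (counting sort); same output, similar cost.


-- ===== PORT A =====
def pvNeedles : List String := [
  "For the quarterly period ended",
  "FORM 10-Q",
  "QUARTERLY REPORT",
  "Commission file number",
  "UNITED STATES SECURITIES AND EXCHANGE COMMISSION"]

def keyword_hits_py (all_docs : List String) : List String :=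
  let hits : List (Int × String) := all_docs.foldl (fun hits d =>
      let dl := PySem.Str.lower (if d = "" then "" else d)   -- (d or "").lower()
      let score : Int := pvNeedles.foldl
        (fun score n => if PySem.Str.isIn (PySem.Str.lower n) dl then score + 1 else score) 0
      if 0 < score then hits ++ [(score, d)] else hits) []
  ((PySem.List.sorted hits Prod.fst true).take 4).map Prod.snd

-- ===== PORT B =====
def keyword_hits_py_alt (all_docs : List String) : List String :=
  let buckets : List (List String) := all_docs.foldl (fun bs d =>
      let dl := PySem.Str.lower (if d = "" then "" else d)   -- (d or "").lower()
      let score : Int :=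
        ((pvNeedles.filter (fun n => PySem.Str.isIn (PySem.Str.lower n) dl)).length : Int)
      if 0 < score then bs.set score.toNat ((bs.getD score.toNat []) ++ [d]) else bs)
    (List.replicate 6 [])
  -- buckets always has length 6 and score ∈ [1,5], so getD's default is never used
  ((buckets.getD 5 []) ++ (buckets.getD 4 []) ++ (buckets.getD 3 []) ++
   (buckets.getD 2 []) ++ (buckets.getD 1 [])).take 4

-- ===== PRECONDITION & SPEC =====
def Spec_keyword_hits_py (all_docs : List String) (out : List String) : Prop := out = keyword_hits_py_alt all_docs
instance (all_docs : List String) (out : List String) : Decidable (Spec_keyword_hits_py all_docs out) := by unfold Spec_keyword_hits_py; infer_instance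

-- ===== CLAIM (what is proved, stated in full; the proofs are below) =====
def Claim_equal_keyword_hits_py : Prop := ∀ (all_docs : List String), Dom_keyword_hits_py all_docs → Spec_keyword_hits_py all_docs (keyword_hits_py all_docs)

-- ===== LEMMAS AND PROOFS =====

-- the common per-document score
def pvScore (d : String) : Int :=
  ((pvNeedles.filter (fun n =>
      PySem.Str.isIn (PySem.Str.lower n) (PySem.Str.lower (if d = "" then "" else d)))).length : Int)

lemma pvScore_nonneg (d : String) : 0 ≤ pvScore d := by
  simp [pvScore]

lemma pvScore_le_five (d : String) : pvScore d ≤ 5 := by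
  have h := List.length_filter_le (fun n =>
      PySem.Str.isIn (PySem.Str.lower n) (PySem.Str.lower (if d = "" then "" else d))) pvNeedles
  simp only [pvScore]
  exact_mod_cast le_trans h (by simp [pvNeedles])

-- A's counting loop is pvScore
lemma foldl_count_eq (p : String → Bool) (l : List String) (c : Int) :
    l.foldl (fun s n => if p n then s + 1 else s) c = c + ((l.filter p).length : Int) := by
  induction l generalizing c with
  | nil => simp
  | cons x xs ih =>
    by_cases hx : p x <;> simp [hx, ih] <;> ring

-- A's hits accumulator in closed form
def pvHits (l : List String) : List (Int × String) :=
  l.flatMap (fun d => if 0 < pvScore d then [(pvScore d, d)] else [])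

lemma hits_foldl (l : List String) (acc : List (Int × String)) :
    l.foldl (fun hits d =>
      if 0 < pvScore d then hits ++ [(pvScore d, d)] else hits) acc = acc ++ pvHits l := by
  induction l generalizing acc with
  | nil => simp [pvHits]
  | cons x xs ih =>
    by_cases hx : 0 < pvScore x <;> simp [hx, ih, pvHits]

lemma mem_pvHits {x : Int × String} {l : List String} (hx : x ∈ pvHits l) :
    1 ≤ x.1 ∧ x.1 ≤ 5 := by
  simp only [pvHits, List.mem_flatMap] at hx
  obtain ⟨d, _, hd⟩ := hx
  by_cases h : 0 < pvScore d
  · simp [h] at hd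
    subst hd
    exact ⟨h, pvScore_le_five d⟩
  · simp [h] at hd

-- insertBy skips a block it is not "before"
lemma insertBy_append_not {α : Type} (bef : α → α → Bool) (x : α) (as bs : List α)
    (h : ∀ y ∈ as, bef x y = false) :
    PySem.List.insertBy bef x (as ++ bs) = as ++ PySem.List.insertBy bef x bs := by
  induction as with
  | nil => simp
  | cons y ys ih =>
    have hy : bef x y = false := h y (by simp)
    simp [PySem.List.insertBy, hy, ih (fun z hz => h z (by simp [hz]))]

-- insertBy goes in front of a block it is "before" everywhere
lemma insertBy_front {α : Type} (bef : α → α → Bool) (x : α) (bs : List α)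
    (h : ∀ y ∈ bs, bef x y = true) :
    PySem.List.insertBy bef x bs = x :: bs := by
  cases bs with
  | nil => simp [PySem.List.insertBy]
  | cons y ys => simp [PySem.List.insertBy, h y (by simp)]

-- the buckets of a pair list, by key
def pvB (k : Int) (l : List (Int × String)) : List (Int × String) :=
  l.filter (fun x => x.1 = k)

lemma mem_pvB {y : Int × String} {j : Int} {l : List (Int × String)} (h : y ∈ pvB j l) :
    y.1 = j := by
  simp [pvB, List.mem_filter] at h; exact h.2

-- inserting a key-k element lands at the end of bucket k
lemma insert_bucket (x : Int × String) (l : List (Int × String))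
    (h1 : 1 ≤ x.1) (h5 : x.1 ≤ 5) :
    PySem.List.insertBy (fun a b => decide (Prod.fst b < Prod.fst a)) x
      (pvB 5 l ++ pvB 4 l ++ pvB 3 l ++ pvB 2 l ++ pvB 1 l) =
      pvB 5 (l ++ [x]) ++ pvB 4 (l ++ [x]) ++ pvB 3 (l ++ [x]) ++
        pvB 2 (l ++ [x]) ++ pvB 1 (l ++ [x]) := by
  have hcase : x.1 = 1 ∨ x.1 = 2 ∨ x.1 = 3 ∨ x.1 = 4 ∨ x.1 = 5 := by omega
  have skip : ∀ (as bs : List (Int × String)), (∀ y ∈ as, ¬ y.1 < x.1) →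
      PySem.List.insertBy (fun a b => decide (Prod.fst b < Prod.fst a)) x (as ++ bs) =
        as ++ PySem.List.insertBy (fun a b => decide (Prod.fst b < Prod.fst a)) x bs := by
    intro as bs h
    exact insertBy_append_not _ _ _ _ (fun y hy => by simpa using h y hy)
  have front : ∀ (bs : List (Int × String)), (∀ y ∈ bs, y.1 < x.1) →
      PySem.List.insertBy (fun a b => decide (Prod.fst b < Prod.fst a)) x bs = x :: bs := by
    intro bs h
    exact insertBy_front _ _ _ (fun y hy => by simpa using h y hy)
  rcases hcase with hx | hx | hx | hx | hx
  · rw [show pvB 5 l ++ pvB 4 l ++ pvB 3 l ++ pvB 2 l ++ pvB 1 l =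
        (pvB 5 l ++ pvB 4 l ++ pvB 3 l ++ pvB 2 l ++ pvB 1 l) ++ [] by simp,
      skip _ _ (by intro y hy; simp only [List.mem_append] at hy
                   rcases hy with ((((h|h)|h)|h)|h) <;> (have := mem_pvB h; omega)),
      front [] (by simp)]
    simp [pvB, List.filter_append, hx]
  · rw [show pvB 5 l ++ pvB 4 l ++ pvB 3 l ++ pvB 2 l ++ pvB 1 l =
        (pvB 5 l ++ pvB 4 l ++ pvB 3 l ++ pvB 2 l) ++ pvB 1 l by simp,
      skip _ _ (by intro y hy; simp only [List.mem_append] at hy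
                   rcases hy with (((h|h)|h)|h) <;> (have := mem_pvB h; omega)),
      front _ (by intro y hy; have := mem_pvB hy; omega)]
    simp [pvB, List.filter_append, hx]
  · rw [show pvB 5 l ++ pvB 4 l ++ pvB 3 l ++ pvB 2 l ++ pvB 1 l =
        (pvB 5 l ++ pvB 4 l ++ pvB 3 l) ++ (pvB 2 l ++ pvB 1 l) by simp,
      skip _ _ (by intro y hy; simp only [List.mem_append] at hy
                   rcases hy with ((h|h)|h) <;> (have := mem_pvB h; omega)),
      front _ (by intro y hy; simp only [List.mem_append] at hy
                  rcases hy with h|h <;> (have := mem_pvB h; omega))]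
    simp [pvB, List.filter_append, hx]
  · rw [show pvB 5 l ++ pvB 4 l ++ pvB 3 l ++ pvB 2 l ++ pvB 1 l =
        (pvB 5 l ++ pvB 4 l) ++ (pvB 3 l ++ pvB 2 l ++ pvB 1 l) by simp,
      skip _ _ (by intro y hy; simp only [List.mem_append] at hy
                   rcases hy with h|h <;> (have := mem_pvB h; omega)),
      front _ (by intro y hy; simp only [List.mem_append] at hy
                  rcases hy with (h|h)|h <;> (have := mem_pvB h; omega))]
    simp [pvB, List.filter_append, hx]
  · rw [show pvB 5 l ++ pvB 4 l ++ pvB 3 l ++ pvB 2 l ++ pvB 1 l =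
        pvB 5 l ++ (pvB 4 l ++ pvB 3 l ++ pvB 2 l ++ pvB 1 l) by simp,
      skip _ _ (by intro y hy; have := mem_pvB hy; omega),
      front _ (by intro y hy; simp only [List.mem_append] at hy
                  rcases hy with ((h|h)|h)|h <;> (have := mem_pvB h; omega))]
    simp [pvB, List.filter_append, hx]

-- stable reverse sort of a list with keys in [1,5] is the bucket concatenation
lemma sorted_buckets (l : List (Int × String))
    (hk : ∀ x ∈ l, 1 ≤ x.1 ∧ x.1 ≤ 5) :
    PySem.List.sorted l Prod.fst true =
      pvB 5 l ++ pvB 4 l ++ pvB 3 l ++ pvB 2 l ++ pvB 1 l := by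
  rw [PySem.List.sorted_rev_eq_foldl_insertBy]
  induction l using List.reverseRecOn with
  | nil => simp [pvB]
  | append_singleton ds x ih =>
    rw [List.foldl_append, List.foldl_cons, List.foldl_nil,
        ih (fun y hy => hk y (by simp [hy]))]
    exact insert_bucket x ds (hk x (by simp)).1 (hk x (by simp)).2

lemma buckets_foldl (l : List String) :
    l.foldl (fun bs d =>
      if 0 < pvScore d then
        bs.set (pvScore d).toNat ((bs.getD (pvScore d).toNat []) ++ [d]) else bs)
      (List.replicate 6 []) =
    [[], l.filter (fun d => pvScore d = 1), l.filter (fun d => pvScore d = 2),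
      l.filter (fun d => pvScore d = 3), l.filter (fun d => pvScore d = 4),
      l.filter (fun d => pvScore d = 5)] := by
  induction l using List.reverseRecOn with
  | nil => simp [List.replicate]
  | append_singleton ds x ih =>
    rw [List.foldl_append, List.foldl_cons, List.foldl_nil, ih]
    have h0 := pvScore_nonneg x
    have h5 := pvScore_le_five x
    by_cases h : 0 < pvScore x
    · have hcase : pvScore x = 1 ∨ pvScore x = 2 ∨ pvScore x = 3 ∨
          pvScore x = 4 ∨ pvScore x = 5 := by omega
      rcases hcase with hx | hx | hx | hx | hx <;>
        simp [hx, List.filter_append]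
    · have hx : pvScore x = 0 := by omega
      simp [hx, List.filter_append]

lemma pvB_hits (l : List String) (k : Int) (hk : 1 ≤ k) :
    (pvB k (pvHits l)).map Prod.snd = l.filter (fun d => pvScore d = k) := by
  induction l with
  | nil => simp [pvB, pvHits]
  | cons d ds ih =>
    have hstep : pvHits (d :: ds) =
        (if 0 < pvScore d then [(pvScore d, d)] else []) ++ pvHits ds := by
      simp [pvHits]
    simp only [pvB] at ih
    by_cases he : pvScore d = k
    · have h : 0 < pvScore d := by omega
      have h0 : (0 : Int) < k := by omega
      simp [pvB, hstep, he, h0, ih]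
    · by_cases h : 0 < pvScore d <;>
        simp [pvB, hstep, h, he, ih]

-- ===== VERDICT (by name: the statement is the Claim_ definition above) =====
theorem keyword_hits_py_spec : Claim_equal_keyword_hits_py := by
  intro all_docs _
  unfold Spec_keyword_hits_py keyword_hits_py keyword_hits_py_alt
  simp only [foldl_count_eq, zero_add]
  rw [show (fun (hits : List (Int × String)) (d : String) =>
        if 0 < ((pvNeedles.filter (fun n => PySem.Str.isIn (PySem.Str.lower n)
            (PySem.Str.lower (if d = "" then "" else d)))).length : Int)
        then hits ++ [(((pvNeedles.filter (fun n => PySem.Str.isIn (PySem.Str.lower n)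
            (PySem.Str.lower (if d = "" then "" else d)))).length : Int), d)] else hits) =
      (fun hits d => if 0 < pvScore d then hits ++ [(pvScore d, d)] else hits) from rfl]
  rw [show (fun (bs : List (List String)) (d : String) =>
        if 0 < ((pvNeedles.filter (fun n => PySem.Str.isIn (PySem.Str.lower n)
            (PySem.Str.lower (if d = "" then "" else d)))).length : Int)
        then bs.set (((pvNeedles.filter (fun n => PySem.Str.isIn (PySem.Str.lower n)
            (PySem.Str.lower (if d = "" then "" else d)))).length : Int)).toNat
          ((bs.getD (((pvNeedles.filter (fun n => PySem.Str.isIn (PySem.Str.lower n)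
            (PySem.Str.lower (if d = "" then "" else d)))).length : Int)).toNat []) ++ [d]) else bs) =
      (fun bs d => if 0 < pvScore d then
        bs.set (pvScore d).toNat ((bs.getD (pvScore d).toNat []) ++ [d]) else bs) from rfl]
  rw [hits_foldl all_docs [], buckets_foldl all_docs, List.nil_append]
  rw [sorted_buckets (pvHits all_docs) (fun x hx => ⟨(mem_pvHits hx).1, (mem_pvHits hx).2⟩)]
  simp [List.map_take, List.map_append,
    pvB_hits all_docs 5 (by norm_num), pvB_hits all_docs 4 (by norm_num),
    pvB_hits all_docs 3 (by norm_num), pvB_hits all_docs 2 (by norm_num),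
    pvB_hits all_docs 1 (by norm_num), List.getD]
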